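-- pv_equiv track=rewrite | github.com/MerriGithub/trading_app | backtest.py | estimate_combinations
-- ===== SOURCE A (Python) =====
-- from itertools import combinations
--
-- def estimate_combinations(
--     min_long: int, max_long: int,
--     min_short: int, max_short: int,
--     n: int = 12,
--     # Backward compatibility
--     min_legs: int | None = None, max_legs: int | None = None,
-- ) -> int:
--     """Total non-overlapping (long, short) pairs for given leg ranges."""
--     if min_legs is not None:
--         min_long = min_short = min_legs
--     if max_legs is not None:
--         max_long = max_short = max_legs
--
--     total = 0
--     for nl in range(min_long, max_long + 1):
--         combos_l = list(combinations(range(n), nl))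
--         for ns in range(min_short, max_short + 1):
--             combos_s = list(combinations(range(n), ns))
--             for l in combos_l:
--                 for s in combos_s:
--                     if not (set(l) & set(s)):
--                         total += 1
--     return total
-- ===== SOURCE B (Python) =====
-- def _comb(m, k):
--     # binomial coefficient C(m, k), 0 outside 0 <= k <= m
--     if k < 0 or k > m:
--         return 0
--     r = 1
--     for i in range(k):
--         r = r * (m - i) // (i + 1)
--     return r
--
--
-- def estimate_combinations(
--     min_long: int, max_long: int,
--     min_short: int, max_short: int,
--     n: int = 12,
--     # Backward compatibility
--     min_legs: int | None = None, max_legs: int | None = None,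
-- ) -> int:
--     """Total non-overlapping (long, short) pairs, by the closed form
--     sum over nl, ns of C(N, nl) * C(N - nl, ns)."""
--     if min_legs is not None:
--         min_long = min_short = min_legs
--     if max_legs is not None:
--         max_long = max_short = max_legs
--     N = n if n > 0 else 0
--     total = 0
--     for nl in range(max(min_long, 0), min(max_long, N) + 1):
--         cl = _comb(N, nl)
--         for ns in range(max(min_short, 0), min(max_short, N - nl) + 1):
--             total += cl * _comb(N - nl, ns)
--     return total
-- ===== Notes on version B (the rewrite author's own statement) =====
-- stated objective: alternative
-- what changed: replaces the exponential enumeration of all subset pairs (itertools.combinations with a quadruple nested loop and set intersections) by the closed-form sum of C(N,nl)*C(N-nl,ns) over the leg ranges clamped to [0,N]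
import Mathlib
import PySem

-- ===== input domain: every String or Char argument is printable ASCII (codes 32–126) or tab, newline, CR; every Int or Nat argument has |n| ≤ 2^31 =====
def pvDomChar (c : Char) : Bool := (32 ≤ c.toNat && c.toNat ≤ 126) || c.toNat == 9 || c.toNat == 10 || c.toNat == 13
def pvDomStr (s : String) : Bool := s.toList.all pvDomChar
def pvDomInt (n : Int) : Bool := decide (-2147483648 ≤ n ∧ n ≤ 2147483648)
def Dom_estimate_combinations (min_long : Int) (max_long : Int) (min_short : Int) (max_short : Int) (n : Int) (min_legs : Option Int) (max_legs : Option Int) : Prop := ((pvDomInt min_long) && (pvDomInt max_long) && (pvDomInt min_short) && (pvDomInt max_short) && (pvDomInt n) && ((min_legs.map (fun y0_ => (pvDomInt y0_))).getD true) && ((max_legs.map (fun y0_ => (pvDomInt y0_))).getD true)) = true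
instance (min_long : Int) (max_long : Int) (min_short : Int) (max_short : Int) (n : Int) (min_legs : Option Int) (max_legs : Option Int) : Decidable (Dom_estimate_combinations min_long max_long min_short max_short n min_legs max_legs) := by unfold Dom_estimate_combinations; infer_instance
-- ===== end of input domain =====

-- B replaces A's enumeration of all subset pairs by the closed-form sum of
-- binomial-coefficient products over the leg ranges clamped to [0, N] (objective: alternative).

-- ===== PORT A =====
-- Literal port of Source A. 'nl.toNat' / 'ns.toNat': Python's combinations(range(n), r) raises
-- ValueError for negative r; Pre_estimate_combinations excludes exactly those inputs.
def estimate_combinations (min_long : Int) (max_long : Int) (min_short : Int) (max_short : Int) (n : Int) (min_legs : Option Int) (max_legs : Option Int) : Int :=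
  let minL := match min_legs with | some v => v | none => min_long
  let minS := match min_legs with | some v => v | none => min_short
  let maxL := match max_legs with | some v => v | none => max_long
  let maxS := match max_legs with | some v => v | none => max_short
  (PySem.List.pyRange minL (maxL + 1) 1).foldl (fun total nl =>
    let combos_l := PySem.List.combinations (PySem.List.pyRange 0 n 1) nl.toNat
    (PySem.List.pyRange minS (maxS + 1) 1).foldl (fun total ns =>
      let combos_s := PySem.List.combinations (PySem.List.pyRange 0 n 1) ns.toNat
      combos_l.foldl (fun total l =>
        combos_s.foldl (fun total s =>
          -- 'if not (set(l) & set(s)): total += 1'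
          if (PySem.Set.inter (PySem.Set.ofList l) (PySem.Set.ofList s)).isEmpty
          then total + 1 else total) total) total) total) 0

-- ===== PORT B =====
-- port of Source B's _comb
def pyComb (m : Int) (k : Int) : Int :=
  if k < 0 || m < k then 0
  else (PySem.List.pyRange 0 k 1).foldl (fun r i => PySem.Int.floordiv (r * (m - i)) (i + 1)) 1

def estimate_combinations_alt (min_long : Int) (max_long : Int) (min_short : Int) (max_short : Int) (n : Int) (min_legs : Option Int) (max_legs : Option Int) : Int :=
  let minL := match min_legs with | some v => v | none => min_long
  let minS := match min_legs with | some v => v | none => min_short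
  let maxL := match max_legs with | some v => v | none => max_long
  let maxS := match max_legs with | some v => v | none => max_short
  let N : Int := if 0 < n then n else 0
  (PySem.List.pyRange (max minL 0) (min maxL N + 1) 1).foldl (fun total nl =>
    let cl := pyComb N nl
    (PySem.List.pyRange (max minS 0) (min maxS (N - nl) + 1) 1).foldl (fun total ns =>
      total + cl * pyComb (N - nl) ns) total) 0

-- ===== PRECONDITION & SPEC =====
-- Pre_ holds exactly where the Python A returns normally: A raises ValueError when the
-- long loop is entered with a negative leg size, or with the short loop entered on a
-- negative short leg size; no other input is excluded.
def Pre_estimate_combinations (min_long : Int) (max_long : Int) (min_short : Int) (max_short : Int) (n : Int) (min_legs : Option Int) (max_legs : Option Int) : Prop :=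
  (max_legs.getD max_long) < (min_legs.getD min_long) ∨
  (0 ≤ min_legs.getD min_long ∧
    ((max_legs.getD max_short) < (min_legs.getD min_short) ∨ 0 ≤ min_legs.getD min_short))
instance (min_long : Int) (max_long : Int) (min_short : Int) (max_short : Int) (n : Int) (min_legs : Option Int) (max_legs : Option Int) : Decidable (Pre_estimate_combinations min_long max_long min_short max_short n min_legs max_legs) := by unfold Pre_estimate_combinations; infer_instance

def pvWitness_estimate_combinations : Int × Int × Int × Int × Int × Option Int × Option Int :=
  (1, 2, 1, 2, 4, none, none)

def Spec_estimate_combinations (min_long : Int) (max_long : Int) (min_short : Int) (max_short : Int) (n : Int) (min_legs : Option Int) (max_legs : Option Int) (out : Int) : Prop := out = estimate_combinations_alt min_long max_long min_short max_short n min_legs max_legs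
instance (min_long : Int) (max_long : Int) (min_short : Int) (max_short : Int) (n : Int) (min_legs : Option Int) (max_legs : Option Int) (out : Int) : Decidable (Spec_estimate_combinations min_long max_long min_short max_short n min_legs max_legs out) := by unfold Spec_estimate_combinations; infer_instance

-- ===== CLAIM (what is proved, stated in full; the proofs are below) =====
def Claim_equal_estimate_combinations : Prop := ∀ (min_long : Int) (max_long : Int) (min_short : Int) (max_short : Int) (n : Int) (min_legs : Option Int) (max_legs : Option Int), Dom_estimate_combinations min_long max_long min_short max_short n min_legs max_legs → Pre_estimate_combinations min_long max_long min_short max_short n min_legs max_legs → Spec_estimate_combinations min_long max_long min_short max_short n min_legs max_legs (estimate_combinations min_long max_long min_short max_short n min_legs max_legs)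

-- ===== LEMMAS AND PROOFS =====

-- the disjointness test of A's inner loop
def pvDisj (l s : List Int) : Bool :=
  (PySem.Set.inter (PySem.Set.ofList l) (PySem.Set.ofList s)).isEmpty

-- count of non-overlapping (l, s) pairs drawn from the r-combinations of L
def pvS (L : List Int) (a b : Nat) : Nat :=
  ((PySem.List.combinations L a).map
    (fun l => (PySem.List.combinations L b).countP (fun s => pvDisj l s))).sum


theorem pvDisj_iff (l s : List Int) : pvDisj l s = true ↔ ∀ x ∈ l, x ∉ s := by
  unfold pvDisj
  rw [List.isEmpty_iff, List.eq_nil_iff_forall_not_mem]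
  constructor
  · intro h x hxl hxs
    exact h x (by rw [PySem.Set.mem_inter]; exact ⟨(PySem.Set.mem_ofList _ _).2 hxl, (PySem.Set.mem_ofList _ _).2 hxs⟩)
  · intro h x hx
    rw [PySem.Set.mem_inter, PySem.Set.mem_ofList, PySem.Set.mem_ofList] at hx
    exact h x hx.1 hx.2

theorem pvDisj_nil_left (s : List Int) : pvDisj [] s = true := by
  rw [pvDisj_iff]; simp

theorem pvDisj_nil_right (l : List Int) : pvDisj l [] = true := by
  rw [pvDisj_iff]; simp

theorem pvDisj_cons_cons (x : Int) (l s : List Int) : pvDisj (x :: l) (x :: s) = false := by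
  rw [← Bool.not_eq_true, pvDisj_iff]
  intro h
  exact h x (List.mem_cons_self) (List.mem_cons_self)

theorem pvDisj_cons_left (x : Int) (l s : List Int) (h : x ∉ s) :
    pvDisj (x :: l) s = pvDisj l s := by
  rw [Bool.eq_iff_iff, pvDisj_iff, pvDisj_iff]
  constructor
  · intro h2 y hy; exact h2 y (List.mem_cons_of_mem _ hy)
  · intro h2 y hy
    rcases List.mem_cons.1 hy with rfl | hy
    · exact h
    · exact h2 y hy

theorem pvDisj_cons_right (x : Int) (l s : List Int) (h : x ∉ l) :
    pvDisj l (x :: s) = pvDisj l s := by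
  rw [Bool.eq_iff_iff, pvDisj_iff, pvDisj_iff]
  constructor
  · intro h2 y hy hys; exact h2 y hy (List.mem_cons_of_mem _ hys)
  · intro h2 y hy hys
    rcases List.mem_cons.1 hys with rfl | hys
    · exact h hy
    · exact h2 y hy hys

theorem pvLenComb (L : List Int) (r : Nat) :
    (PySem.List.combinations L r).length = Nat.choose L.length r := by
  induction L generalizing r with
  | nil => cases r <;> simp [PySem.List.combinations_zero, PySem.List.combinations_nil_succ]
  | cons x xs ih =>
    cases r with
    | zero => simp [PySem.List.combinations_zero]
    | succ r =>
      simp [PySem.List.combinations_cons_succ, ih, Nat.choose_succ_succ]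

theorem pvNotMemComb {x : Int} {xs l : List Int} {r : Nat}
    (hx : x ∉ xs) (hl : l ∈ PySem.List.combinations xs r) : x ∉ l := by
  intro hxl
  exact hx ((PySem.List.sublist_of_mem_combinations hl).subset hxl)


theorem pvChooseId (m a b : Nat) :
    Nat.choose m a * Nat.choose (m - a) (b + 1)
      + (Nat.choose m (a + 1) * Nat.choose (m - (a + 1)) b
         + Nat.choose m (a + 1) * Nat.choose (m - (a + 1)) (b + 1))
    = Nat.choose (m + 1) (a + 1) * Nat.choose (m - a) (b + 1) := by
  by_cases h : a < m
  · have h1 : m - a = (m - (a + 1)) + 1 := by omega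
    rw [Nat.choose_succ_succ (n := m) (k := a)]
    rw [h1, Nat.choose_succ_succ (n := m - (a+1)) (k := b)]
    ring
  · have h2 : m - a = 0 := by omega
    have h3 : m - (a + 1) = 0 := by omega
    have h4 : Nat.choose m (a + 1) = 0 := Nat.choose_eq_zero_of_lt (by omega)
    rw [h2, h3, h4]
    rw [Nat.choose_succ_succ (n := m) (k := a)]
    simp [Nat.choose_eq_zero_of_lt (Nat.succ_pos b)]

theorem pvS_choose (L : List Int) (hnd : L.Nodup) (a b : Nat) :
    pvS L a b = Nat.choose L.length a * Nat.choose (L.length - a) b := by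
  induction L generalizing a b with
  | nil =>
    cases a with
    | zero =>
      cases b with
      | zero => simp [pvS, PySem.List.combinations_zero, pvDisj_nil_left]
      | succ b => simp [pvS, PySem.List.combinations_zero, PySem.List.combinations_nil_succ]
    | succ a => simp [pvS, PySem.List.combinations_nil_succ]
  | cons x xs ih =>
    rw [List.nodup_cons] at hnd
    obtain ⟨hx, hnd⟩ := hnd
    cases a with
    | zero =>
      -- pvS (x::xs) 0 b = number of b-combinations = C(len+1, b)
      have : pvS (x :: xs) 0 b = (PySem.List.combinations (x :: xs) b).length := by
        rw [pvS, PySem.List.combinations_zero]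
        simp only [List.map_cons, List.map_nil, List.sum_cons, List.sum_nil]
        rw [List.countP_eq_length.mpr (fun s _ => pvDisj_nil_left s)]
        simp
      rw [this, pvLenComb]
      simp
    | succ a =>
      cases b with
      | zero =>
        have : pvS (x :: xs) (a + 1) 0 = (PySem.List.combinations (x :: xs) (a + 1)).length := by
          rw [pvS, PySem.List.combinations_zero]
          have : ∀ l ∈ PySem.List.combinations (x :: xs) (a + 1),
              (List.countP (fun s => pvDisj l s) [([] : List Int)]) = 1 := by
            intro l _
            simp [pvDisj_nil_right]
          rw [List.map_congr_left this]
          simp [List.map_const', List.sum_replicate]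
        rw [this, pvLenComb]
        simp [Nat.choose_zero_right]
      | succ b =>
        have key : pvS (x :: xs) (a + 1) (b + 1)
            = pvS xs a (b + 1) + (pvS xs (a + 1) b + pvS xs (a + 1) (b + 1)) := by
          rw [pvS, PySem.List.combinations_cons_succ (r := a)]
          rw [List.map_append, List.sum_append, List.map_map]
          congr 1
          · -- mapped part: l = x :: l'
            rw [pvS]
            apply congrArg
            apply List.map_congr_left
            intro l' hl'
            simp only [Function.comp]
            rw [PySem.List.combinations_cons_succ (r := b)]
            rw [List.countP_append, List.countP_map]
            have hz : List.countP ((fun s => pvDisj (x :: l') s) ∘ (fun s => x :: s))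
                (PySem.List.combinations xs b) = 0 := by
              rw [List.countP_eq_zero]
              intro s _
              simp [Function.comp, pvDisj_cons_cons]
            rw [hz, Nat.zero_add]
            apply List.countP_congr
            intro s hs
            rw [pvDisj_cons_left x l' s (pvNotMemComb hx hs)]
          · -- un-mapped part
            rw [pvS, pvS]
            have : ∀ l ∈ PySem.List.combinations xs (a + 1),
                List.countP (fun s => pvDisj l s) (PySem.List.combinations (x :: xs) (b + 1))
                  = List.countP (fun s => pvDisj l s) (PySem.List.combinations xs b)
                    + List.countP (fun s => pvDisj l s) (PySem.List.combinations xs (b + 1)) := by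
              intro l hl
              rw [PySem.List.combinations_cons_succ (r := b), List.countP_append, List.countP_map]
              congr 1
              apply List.countP_congr
              intro s _
              simp only [Function.comp]
              rw [pvDisj_cons_right x l s (pvNotMemComb hx hl)]
            rw [List.map_congr_left this]
            exact List.sum_map_add
        rw [key, ih hnd, ih hnd, ih hnd]
        simp only [List.length_cons]
        rw [show xs.length + 1 - (a + 1) = xs.length - a from by omega]
        exact pvChooseId xs.length a b

theorem pvCastS (L : List Int) (a b : Nat) :
    ((PySem.List.combinations L a).map
      (fun l => ((PySem.List.combinations L b).countP
        (fun s => (PySem.Set.inter (PySem.Set.ofList l) (PySem.Set.ofList s)).isEmpty) : Int))).sum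
    = (pvS L a b : Int) := by
  rw [pvS, Nat.cast_list_sum, List.map_map]
  simp [pvDisj, Function.comp_def]


theorem pvCombLoop (m : Int) : ∀ j : Nat, (j : Int) ≤ m →
    (PySem.List.pyRange 0 (j : Int) 1).foldl
      (fun r i => PySem.Int.floordiv (r * (m - i)) (i + 1)) 1
    = (Nat.choose m.toNat j : Int) := by
  intro j
  induction j with
  | zero => intro _; simp [PySem.List.pyRange_one_eq_nil]
  | succ j ih =>
    intro hj
    have hj' : (j : Int) ≤ m := by push_cast at hj ⊢; omega
    rw [show ((j + 1 : Nat) : Int) = (j : Int) + 1 from by push_cast; ring]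
    rw [PySem.List.pyRange_one_succ_right (by positivity)]
    rw [List.foldl_append, ih hj']
    simp only [List.foldl_cons, List.foldl_nil]
    have hsub : m - (j : Int) = ((m.toNat - j : Nat) : Int) := by omega
    rw [hsub]
    rw [show ((Nat.choose m.toNat j : Nat) : Int) * ((m.toNat - j : Nat) : Int)
        = ((Nat.choose m.toNat j * (m.toNat - j) : Nat) : Int) from by push_cast; ring]
    rw [← Nat.choose_succ_right_eq]
    rw [show ((j : Int) + 1) = ((j + 1 : Nat) : Int) from by push_cast; ring]
    rw [PySem.Int.floordiv_natCast]
    rw [Nat.mul_div_cancel _ (Nat.succ_pos j)]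

theorem pvComb_eq (m k : Int) (hm : 0 ≤ m) (hk : 0 ≤ k) :
    pyComb m k = (Nat.choose m.toNat k.toNat : Int) := by
  unfold pyComb
  by_cases h : m < k
  · rw [if_pos (by simp [h]), Nat.choose_eq_zero_of_lt (by omega)]
    simp
  · rw [if_neg (by simp; omega)]
    conv_lhs => rw [show k = ((k.toNat : Nat) : Int) from by omega]
    rw [pvCombLoop m k.toNat (by omega)]

theorem pvSumTruncAux (f : Int → Int) (B : Int) (hf : ∀ k, B < k → f k = 0) :
    ∀ (n : Nat) (lo hi : Int), 0 ≤ lo → (hi - lo).toNat ≤ n →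
      ((PySem.List.pyRange lo hi 1).map f).sum
        = ((PySem.List.pyRange lo (min (hi - 1) B + 1) 1).map f).sum := by
  intro n
  induction n with
  | zero =>
    intro lo hi hlo hn
    rw [PySem.List.pyRange_one_eq_nil (by omega), PySem.List.pyRange_one_eq_nil (by omega)]
  | succ n ih =>
    intro lo hi hlo hn
    by_cases hle : hi ≤ lo
    · rw [PySem.List.pyRange_one_eq_nil (by omega), PySem.List.pyRange_one_eq_nil (by omega)]
    · by_cases hB : hi - 1 ≤ B
      · rw [min_eq_left hB, show hi - 1 + 1 = hi from by ring]
      · conv_lhs => rw [show hi = (hi - 1) + 1 from by ring]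
        rw [PySem.List.pyRange_one_succ_right (by omega)]
        rw [List.map_append, List.sum_append]
        simp only [List.map_cons, List.map_nil, List.sum_cons, List.sum_nil]
        rw [hf (hi - 1) (by omega)]
        rw [ih lo (hi - 1) hlo (by omega)]
        rw [show min (hi - 1 - 1) B = min (hi - 1) B from by omega]
        ring

theorem pvSumTrunc (f : Int → Int) (B : Int) (hf : ∀ k, B < k → f k = 0) :
    ∀ (hi lo : Int), 0 ≤ lo →
      ((PySem.List.pyRange lo hi 1).map f).sum
        = ((PySem.List.pyRange lo (min (hi - 1) B + 1) 1).map f).sum := by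
  intro hi lo hlo
  exact pvSumTruncAux f B hf (hi - lo).toNat lo hi hlo le_rfl

theorem pvTruncCongr (f g : Int → Int) (B lo hiA hiB : Int) (hlo : 0 ≤ lo)
    (hz : ∀ k, B < k → f k = 0) (hstop : hiB = min (hiA - 1) B + 1)
    (hfg : ∀ k, lo ≤ k → k < hiB → f k = g k) :
    ((PySem.List.pyRange lo hiA 1).map f).sum = ((PySem.List.pyRange lo hiB 1).map g).sum := by
  rw [pvSumTrunc f B hz hiA lo hlo, ← hstop]
  exact congrArg List.sum (List.map_congr_left (fun k hk => by
    rw [PySem.List.mem_pyRange_one] at hk; exact hfg k hk.1 hk.2))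

theorem pvCore (mL xL mS xS n : Int)
    (hpre : xL < mL ∨ (0 ≤ mL ∧ (xS < mS ∨ 0 ≤ mS))) :
    (PySem.List.pyRange mL (xL + 1) 1).foldl (fun total nl =>
      let combos_l := PySem.List.combinations (PySem.List.pyRange 0 n 1) nl.toNat
      (PySem.List.pyRange mS (xS + 1) 1).foldl (fun total ns =>
        let combos_s := PySem.List.combinations (PySem.List.pyRange 0 n 1) ns.toNat
        combos_l.foldl (fun total l =>
          combos_s.foldl (fun total s =>
            if (PySem.Set.inter (PySem.Set.ofList l) (PySem.Set.ofList s)).isEmpty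
            then total + 1 else total) total) total) total) 0
    = (let N : Int := if 0 < n then n else 0
       (PySem.List.pyRange (max mL 0) (min xL N + 1) 1).foldl (fun total nl =>
         let cl := pyComb N nl
         (PySem.List.pyRange (max mS 0) (min xS (N - nl) + 1) 1).foldl (fun total ns =>
           total + cl * pyComb (N - nl) ns) total) 0) := by
  have hN0 : (0:Int) ≤ if 0 < n then n else 0 := by split <;> omega
  have hnN : n ≤ if 0 < n then n else 0 := by split <;> omega
  set N : Int := if 0 < n then n else 0 with hNdef
  have hnod : (PySem.List.pyRange 0 n 1).Nodup := PySem.List.nodup_pyRange_one _ _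
  have hlen : (PySem.List.pyRange 0 n 1).length = n.toNat := by
    rw [PySem.List.length_pyRange_one]; omega
  have hNn : N.toNat = n.toNat := by rw [hNdef]; split <;> omega
  simp only [PySem.List.foldl_if_add_one, PySem.List.foldl_add, pvCastS, zero_add]
  rcases hpre with hempty | ⟨hmL, hpre2⟩
  · rw [PySem.List.pyRange_one_eq_nil (show xL + 1 ≤ mL by omega),
        PySem.List.pyRange_one_eq_nil (show min xL N + 1 ≤ max mL 0 by omega)]
    simp
  · rw [show max mL 0 = mL from by omega]
    apply pvTruncCongr _ _ N mL (xL + 1) (min xL N + 1) hmL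
    · -- outer terms vanish beyond N
      intro k hk
      apply List.sum_eq_zero
      intro x hx
      rw [List.mem_map] at hx
      obtain ⟨ns, -, rfl⟩ := hx
      rw [pvS_choose _ hnod, hlen,
          Nat.choose_eq_zero_of_lt (show n.toNat < k.toNat by omega)]
      simp
    · omega
    · intro nl hmLnl hnlN'
      have hnl0 : 0 ≤ nl := le_trans hmL hmLnl
      have hnlN : nl ≤ N := by omega
      rcases hpre2 with hsempty | hmS
      · rw [PySem.List.pyRange_one_eq_nil (show xS + 1 ≤ mS by omega),
            PySem.List.pyRange_one_eq_nil (show min xS (N - nl) + 1 ≤ max mS 0 by omega)]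
        simp
      · rw [show max mS 0 = mS from by omega]
        apply pvTruncCongr _ _ (N - nl) mS (xS + 1) (min xS (N - nl) + 1) hmS
        · intro k hk
          rw [pvS_choose _ hnod, hlen,
              Nat.choose_eq_zero_of_lt (show n.toNat - nl.toNat < k.toNat by omega)]
          simp
        · omega
        · intro ns hmSns hnsN'
          have hns0 : 0 ≤ ns := le_trans hmS hmSns
          have hnsN : ns ≤ N - nl := by omega
          rw [pvS_choose _ hnod, hlen, pvComb_eq N nl hN0 hnl0,
              pvComb_eq (N - nl) ns (by omega) hns0,
              show (N - nl).toNat = N.toNat - nl.toNat from by omega, hNn]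
          push_cast
          ring

-- ===== VERDICT (by name: the statement is the Claim_ definition above) =====
theorem estimate_combinations_spec : Claim_equal_estimate_combinations := by
  intro min_long max_long min_short max_short n min_legs max_legs _ hpre
  unfold Spec_estimate_combinations estimate_combinations estimate_combinations_alt
  rcases min_legs with _ | ml <;> rcases max_legs with _ | xl <;>
    simp only [Option.getD_some, Option.getD_none, Pre_estimate_combinations] at hpre <;>
    exact pvCore _ _ _ _ n hpre
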